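-- pv_equiv track=rewrite | github.com/FedericoTudini/Homework-Python | 01/program02.py | es2
-- ===== SOURCE A (Python) =====
-- def es2(N, ins):
--     ris=[]
--     insieme=ins.copy()
--     for x in reversed(range(1,N+1)):
--         if x not in insieme:
--                ris.append(x)
--                for i in range(1,(x//2)+1):
--                    if x % i == 0:
--                           if i in insieme:
--                               insieme.remove(i)
--                           else:
--                               insieme.add(i)
--     return sorted(ris)
-- ===== SOURCE B (Python) =====
-- def es2(N, ins):
--     s = set(ins)
--     ris = []
--     for x in reversed(range(1, N + 1)):
--         if x not in s:
--             ris.append(x)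
--             # toggle every proper divisor of x, found in pairs (d, x//d)
--             d = 1
--             while d * d <= x:
--                 if x % d == 0:
--                     if d != x:
--                         s ^= {d}
--                     e = x // d
--                     if e != d and e != x:
--                         s ^= {e}
--                 d += 1
--     ris.reverse()
--     return ris
-- ===== Notes on version B (the rewrite author's own statement) =====
-- stated objective: faster
-- what changed: Instead of scanning all candidates 1..x//2 for divisors of each picked x, B enumerates the proper divisors of x in pairs (d, x//d) up to sqrt(x); since toggles commute the resulting set is the same, and the result list is built descending and reversed instead of sorted.
import Mathlib
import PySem

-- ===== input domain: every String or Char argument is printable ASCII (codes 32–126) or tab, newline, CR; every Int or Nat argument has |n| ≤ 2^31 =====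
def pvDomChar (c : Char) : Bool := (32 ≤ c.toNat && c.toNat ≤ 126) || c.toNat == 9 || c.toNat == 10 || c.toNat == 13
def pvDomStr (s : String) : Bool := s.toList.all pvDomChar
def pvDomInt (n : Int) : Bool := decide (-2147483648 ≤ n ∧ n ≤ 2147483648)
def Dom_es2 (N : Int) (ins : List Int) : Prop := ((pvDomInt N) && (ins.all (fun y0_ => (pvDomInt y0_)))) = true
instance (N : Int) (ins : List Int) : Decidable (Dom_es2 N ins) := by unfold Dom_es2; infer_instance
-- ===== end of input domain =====

-- B replaces A's 1..x//2 divisor scan by paired divisor enumeration up to sqrt(x) (the toggles commute),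
-- and reverses the descending result list instead of sorting it.

-- ===== PORT A =====
-- body of A's inner 'if x % i == 0' branch: remove i if present else add i
-- (insieme.remove(i) is only reached under 'i in insieme', so it never raises; Set.discard equals remove there)
def es2StepA (_x : Int) (s : PySem.Set Int) (i : Int) : PySem.Set Int :=
  if PySem.Set.contains s i then PySem.Set.discard s i else PySem.Set.add s i

-- body of A's outer 'for x in reversed(range(1, N+1))' loop
def es2BodyA (st : List Int × PySem.Set Int) (x : Int) : List Int × PySem.Set Int :=
  if PySem.Set.contains st.2 x then st
  else
    (st.1 ++ [x],
     (PySem.List.pyRange 1 (PySem.Int.floordiv x 2 + 1) 1).foldl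
       (fun s i => if PySem.Int.mod x i = 0 then es2StepA x s i else s) st.2)

def es2 (N : Int) (ins : List Int) : List Int :=
  let st := ((PySem.List.pyRange 1 (N+1) 1).reverse).foldl es2BodyA ([], PySem.Set.ofList ins)
  PySem.List.sorted st.1 (fun y => y) false

-- ===== PORT B =====
-- body of B's 'if x % d == 0' branch: toggle the divisor pair (d, x//d) by symmetric difference
def es2ToggleB (x d : Int) (s : PySem.Set Int) : PySem.Set Int :=
  if PySem.Int.mod x d = 0 then
    let s' := if d ≠ x then PySem.Set.symmDiff s [d] else s
    let e := PySem.Int.floordiv x d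
    if e ≠ d ∧ e ≠ x then PySem.Set.symmDiff s' [e] else s'
  else s

-- B's 'while d * d <= x' loop; the Nat fuel only makes the recursion structural: it is
-- (x + 1 - d).toNat, which the loop guard d*d ≤ x can never exhaust, so it changes nothing
def es2InnerBGo (x : Int) : Nat → Int → PySem.Set Int → PySem.Set Int
  | 0, _, s => s
  | Nat.succ fuel, d, s =>
    if d * d ≤ x then es2InnerBGo x fuel (d + 1) (es2ToggleB x d s) else s

def es2InnerB (x d : Int) (s : PySem.Set Int) : PySem.Set Int :=
  es2InnerBGo x (x + 1 - d).toNat d s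

-- body of B's outer 'for x in reversed(range(1, N+1))' loop
def es2BodyB (st : List Int × PySem.Set Int) (x : Int) : List Int × PySem.Set Int :=
  if PySem.Set.contains st.2 x then st
  else (st.1 ++ [x], es2InnerB x 1 st.2)

def es2_alt (N : Int) (ins : List Int) : List Int :=
  let st := ((PySem.List.pyRange 1 (N+1) 1).reverse).foldl es2BodyB ([], PySem.Set.ofList ins)
  st.1.reverse

-- ===== PRECONDITION & SPEC =====
def Spec_es2 (N : Int) (ins : List Int) (out : List Int) : Prop := out = es2_alt N ins
instance (N : Int) (ins : List Int) (out : List Int) : Decidable (Spec_es2 N ins out) := by unfold Spec_es2; infer_instance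

-- ===== CLAIM (what is proved, stated in full; the proofs are below) =====
def Claim_equal_es2 : Prop := ∀ (N : Int) (ins : List Int), Dom_es2 N ins → Spec_es2 N ins (es2 N ins)

-- ===== LEMMAS AND PROOFS =====

-- a is a proper divisor of x
def PDiv (x a : Int) : Prop := 1 ≤ a ∧ a < x ∧ a ∣ x

-- Xor' glue lemmas for composing membership toggles
theorem xor_step (p q r t : Prop) (hq : Xor' q r ↔ t) : Xor' (Xor' p q) r ↔ Xor' p t := by
  unfold Xor' at *; tauto

theorem xor_false_iff (p q : Prop) (hq : ¬ q) : Xor' p q ↔ p := by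
  unfold Xor'; tauto

theorem xor_false_left (p q : Prop) (hp : ¬ p) : Xor' p q ↔ q := by
  unfold Xor'; tauto

theorem xor_congr_right (p q t : Prop) (hq : q ↔ t) : Xor' p q ↔ Xor' p t := by
  unfold Xor'; tauto

-- membership after a symmetric difference with a singleton is a toggle
theorem mem_toggle (s : List Int) (d a : Int) :
    a ∈ PySem.Set.symmDiff s [d] ↔ Xor' (a ∈ s) (a = d) := by
  rw [PySem.Set.mem_symmDiff]; unfold Xor'; simp

-- membership after A's remove/add branch is the same toggle
theorem mem_stepA (x : Int) (s : List Int) (i a : Int) :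
    a ∈ es2StepA x s i ↔ Xor' (a ∈ s) (a = i) := by
  unfold es2StepA
  by_cases h : i ∈ s
  · rw [if_pos ((PySem.Set.contains_iff _ _).mpr h), PySem.Set.mem_discard]
    unfold Xor'; constructor
    · rintro ⟨h1, h2⟩; tauto
    · rintro (⟨h1, h2⟩ | ⟨h1, h2⟩)
      · exact ⟨h1, h2⟩
      · exact absurd (h1 ▸ h) h2
  · rw [if_neg (fun hc => h ((PySem.Set.contains_iff _ _).mp hc)), PySem.Set.mem_add]
    unfold Xor'; constructor
    · rintro (h1 | h1)
      · exact Or.inl ⟨h1, fun he => h (he ▸ h1)⟩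
      · exact Or.inr ⟨h1, fun hs => h (h1 ▸ hs)⟩
    · rintro (⟨h1, _⟩ | ⟨h1, _⟩)
      · exact Or.inl h1
      · exact Or.inr h1

-- A's inner loop over range(1, n+1): membership toggled exactly on divisors in 1..n
theorem innerA_mem (x : Int) (n : Nat) : ∀ (s : List Int) (a : Int),
    (a ∈ (PySem.List.pyRange 1 ((n : Int) + 1) 1).foldl
          (fun s i => if PySem.Int.mod x i = 0 then es2StepA x s i else s) s
      ↔ Xor' (a ∈ s) (1 ≤ a ∧ a ≤ (n : Int) ∧ PySem.Int.mod x a = 0)) := by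
  induction n with
  | zero =>
    intro s a
    rw [show ((0 : Nat) : Int) + 1 = 1 by norm_num, PySem.List.pyRange_one_eq_nil (le_refl 1)]
    simp only [List.foldl_nil]
    exact (xor_false_iff _ _ (by rintro ⟨h1, h2, _⟩; omega)).symm
  | succ n ih =>
    intro s a
    rw [show ((n + 1 : Nat) : Int) = (n : Int) + 1 by push_cast; ring,
        PySem.List.pyRange_one_succ_right (by omega : (1 : Int) ≤ (n : Int) + 1),
        List.foldl_append]
    simp only [List.foldl_cons, List.foldl_nil]
    by_cases hm : PySem.Int.mod x ((n : Int) + 1) = 0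
    · rw [if_pos hm, mem_stepA, ih s a]
      apply xor_step
      by_cases hM : PySem.Int.mod x a = 0
      · unfold Xor'; constructor
        · rintro (⟨⟨h1, h2, _⟩, _⟩ | ⟨h1, _⟩)
          · exact ⟨h1, by omega, hM⟩
          · exact ⟨by omega, by omega, hM⟩
        · rintro ⟨h1, h2, _⟩
          by_cases he : a = (n : Int) + 1
          · exact Or.inr ⟨he, by rintro ⟨_, hh, _⟩; omega⟩
          · exact Or.inl ⟨⟨h1, by omega, hM⟩, he⟩
      · unfold Xor'; constructor
        · rintro (⟨⟨_, _, hc⟩, _⟩ | ⟨ha, _⟩)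
          · exact absurd hc hM
          · exact absurd (ha ▸ hm) hM
        · rintro ⟨_, _, hc⟩; exact absurd hc hM
    · rw [if_neg hm, ih s a]
      apply xor_congr_right
      constructor
      · rintro ⟨h1, h2, h3⟩; exact ⟨h1, by omega, h3⟩
      · rintro ⟨h1, h2, h3⟩
        refine ⟨h1, ?_, h3⟩
        by_contra hgt
        have ha : a = (n : Int) + 1 := by omega
        exact hm (ha ▸ h3)

-- A's toggle condition is exactly 'proper divisor of x' (for x ≥ 1)
theorem condA_iff (x a : Int) (_hx : 1 ≤ x) :
    (1 ≤ a ∧ a ≤ PySem.Int.floordiv x 2 ∧ PySem.Int.mod x a = 0) ↔ PDiv x a := by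
  rw [PySem.Int.mod_eq_zero_iff_dvd]
  unfold PDiv
  constructor
  · rintro ⟨h1, h2, h3⟩
    have h4 : a * 2 ≤ x := (PySem.Int.le_floordiv_iff_mul_le (by norm_num)).mp h2
    exact ⟨h1, by omega, h3⟩
  · rintro ⟨h1, h2, h3⟩
    refine ⟨h1, (PySem.Int.le_floordiv_iff_mul_le (by norm_num)).mpr ?_, h3⟩
    obtain ⟨c, hc⟩ := h3
    have hc2 : 2 ≤ c := by nlinarith
    nlinarith

-- membership after B's toggle for counter d
theorem mem_toggleB (x d : Int) (s : List Int) (a : Int) :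
    a ∈ es2ToggleB x d s ↔ Xor' (a ∈ s)
      (d ∣ x ∧ ((a = d ∧ d ≠ x) ∨
        (a = PySem.Int.floordiv x d ∧ PySem.Int.floordiv x d ≠ d ∧ PySem.Int.floordiv x d ≠ x))) := by
  unfold es2ToggleB
  by_cases hm : PySem.Int.mod x d = 0
  · rw [if_pos hm]
    have hdvd : d ∣ x := (PySem.Int.mod_eq_zero_iff_dvd x d).mp hm
    by_cases h2 : PySem.Int.floordiv x d ≠ d ∧ PySem.Int.floordiv x d ≠ x
    · rw [if_pos h2]
      by_cases h1 : d ≠ x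
      · rw [if_pos h1, mem_toggle, mem_toggle]
        apply xor_step
        unfold Xor'; constructor
        · rintro (⟨h3, h4⟩ | ⟨h3, h4⟩)
          · exact ⟨hdvd, Or.inl ⟨h3, h1⟩⟩
          · exact ⟨hdvd, Or.inr ⟨h3, h2.1, h2.2⟩⟩
        · rintro ⟨_, (⟨h3, _⟩ | ⟨h3, _, _⟩)⟩
          · exact Or.inl ⟨h3, by have := h2.1; omega⟩
          · exact Or.inr ⟨h3, by have := h2.1; omega⟩
      · rw [if_neg h1, mem_toggle]
        apply xor_congr_right
        constructor
        · intro h3; exact ⟨hdvd, Or.inr ⟨h3, h2.1, h2.2⟩⟩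
        · rintro ⟨_, (⟨_, h4⟩ | ⟨h3, _, _⟩)⟩
          · exact absurd (not_not.mp h1) h4
          · exact h3
    · rw [if_neg h2]
      by_cases h1 : d ≠ x
      · rw [if_pos h1, mem_toggle]
        apply xor_congr_right
        constructor
        · intro h3; exact ⟨hdvd, Or.inl ⟨h3, h1⟩⟩
        · rintro ⟨_, (⟨h3, _⟩ | ⟨_, h4, h5⟩)⟩
          · exact h3
          · exact absurd ⟨h4, h5⟩ h2
      · rw [if_neg h1]
        refine (xor_false_iff _ _ ?_).symm
        rintro ⟨_, (⟨_, h3⟩ | ⟨_, h4, h5⟩)⟩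
        · exact h3 (not_not.mp h1)
        · exact h2 ⟨h4, h5⟩
  · rw [if_neg hm]
    refine (xor_false_iff _ _ ?_).symm
    rintro ⟨h3, _⟩
    exact hm ((PySem.Int.mod_eq_zero_iff_dvd x d).mpr h3)

-- one step of B's divisor-pair scan accounts for exactly the proper divisors whose pair straddles d
theorem cond_step (x d a : Int) (hx : 1 ≤ x) (hd : 1 ≤ d) (hdd : d * d ≤ x) :
    Xor' (d ∣ x ∧ ((a = d ∧ d ≠ x) ∨
        (a = PySem.Int.floordiv x d ∧ PySem.Int.floordiv x d ≠ d ∧ PySem.Int.floordiv x d ≠ x)))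
      (PDiv x a ∧ d + 1 ≤ a ∧ (d + 1) * a ≤ x)
    ↔ (PDiv x a ∧ d ≤ a ∧ d * a ≤ x) := by
  have hdx : d ≤ x := by nlinarith [sq_nonneg (d - 1)]
  by_cases hdvd : d ∣ x
  · obtain ⟨e, hc⟩ := hdvd
    have hef : PySem.Int.floordiv x d = e :=
      (PySem.Int.floordiv_eq_iff_of_pos (by omega)).mpr ⟨by nlinarith, by nlinarith⟩
    have he1 : 1 ≤ e := by
      rw [← hef]
      exact (PySem.Int.le_floordiv_iff_mul_le (by omega)).mpr (by linarith)
    have hde : d ≤ e := by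
      rw [← hef]
      exact (PySem.Int.le_floordiv_iff_mul_le (by omega)).mpr (by linarith)
    have hex : e ≤ x := by nlinarith
    rw [hef]
    unfold Xor' PDiv
    constructor
    · rintro (⟨⟨_, hcase⟩, _⟩ | ⟨⟨⟨h1, h2, h3⟩, h4, h5⟩, _⟩)
      · rcases hcase with ⟨had, hdnx⟩ | ⟨hae, hed, henx⟩
        · exact ⟨⟨by omega, by omega, had ▸ ⟨e, hc⟩⟩, by omega, by rw [had]; exact hdd⟩
        · refine ⟨⟨by omega, by omega, hae ▸ ⟨d, by rw [hc]; ring⟩⟩, by omega, ?_⟩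
          rw [hae]; linarith [hc.ge, hc.le]
      · exact ⟨⟨h1, h2, h3⟩, by omega, by nlinarith⟩
    · rintro ⟨⟨h1, h2, h3⟩, h4, h5⟩
      by_cases had : a = d
      · exact Or.inl ⟨⟨⟨e, hc⟩, Or.inl ⟨had, by omega⟩⟩, by rintro ⟨_, hh, _⟩; omega⟩
      · by_cases h6 : (d + 1) * a ≤ x
        · refine Or.inr ⟨⟨⟨h1, h2, h3⟩, by omega, h6⟩, ?_⟩
          rintro ⟨_, (⟨ha, _⟩ | ⟨ha, _, _⟩)⟩
          · exact had ha
          · nlinarith [ha ▸ h6]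
        · push Not at h6
          obtain ⟨c, hcc⟩ := h3
          have u1 : d ≤ c :=
            le_of_mul_le_mul_left (by nlinarith : a * d ≤ a * c) (by omega)
          have u2 : c < d + 1 :=
            lt_of_mul_lt_mul_left (by nlinarith : a * c < a * (d + 1)) (by omega)
          have hcd : c = d := by omega
          subst hcd
          have hae : a = e := by
            have hh : c * a = c * e := by rw [mul_comm, ← hcc, hc]
            exact mul_left_cancel₀ (by omega) hh
          refine Or.inl ⟨⟨⟨e, hc⟩, Or.inr ⟨hae, by omega, by omega⟩⟩, ?_⟩
          rintro ⟨_, _, hh⟩; omega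
  · rw [xor_false_left _ _ (fun hh => hdvd hh.1)]
    unfold PDiv
    constructor
    · rintro ⟨⟨h1, h2, h3⟩, h4, h5⟩
      exact ⟨⟨h1, h2, h3⟩, by omega, by nlinarith⟩
    · rintro ⟨⟨h1, h2, h3⟩, h4, h5⟩
      have hne : a ≠ d := fun h => hdvd (h ▸ h3)
      refine ⟨⟨h1, h2, h3⟩, by omega, ?_⟩
      by_contra hgt
      push Not at hgt
      obtain ⟨c, hcc⟩ := h3
      have u1 : d ≤ c :=
        le_of_mul_le_mul_left (by nlinarith : a * d ≤ a * c) (by omega)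
      have u2 : c < d + 1 :=
        lt_of_mul_lt_mul_left (by nlinarith : a * c < a * (d + 1)) (by omega)
      exact hdvd ⟨a, by rw [hcc, show c = d by omega]; ring⟩

-- B's while loop from counter d: membership toggled exactly on proper divisors whose pair straddles d
theorem innerBGo_mem (x : Int) (hx : 1 ≤ x) : ∀ (fuel : Nat) (d : Int), 1 ≤ d →
    (x + 1 - d).toNat ≤ fuel → ∀ (s : List Int) (a : Int),
    (a ∈ es2InnerBGo x fuel d s ↔ Xor' (a ∈ s) (PDiv x a ∧ d ≤ a ∧ d * a ≤ x)) := by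
  intro fuel
  induction fuel with
  | zero =>
    intro d hd hle s a
    simp only [es2InnerBGo]
    refine (xor_false_iff _ _ ?_).symm
    rintro ⟨⟨h1, _, _⟩, h2, h3⟩
    have hdx : x + 1 ≤ d := by omega
    nlinarith
  | succ fuel ih =>
    intro d hd hle s a
    simp only [es2InnerBGo]
    by_cases hdd : d * d ≤ x
    · rw [if_pos hdd]
      have hdx : d ≤ x := by nlinarith [sq_nonneg (d - 1)]
      rw [ih (d + 1) (by omega) (by omega) _ a, mem_toggleB x d s a]
      exact xor_step _ _ _ _ (cond_step x d a hx hd hdd)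
    · rw [if_neg hdd]
      refine (xor_false_iff _ _ ?_).symm
      rintro ⟨⟨h1, _, _⟩, h2, h3⟩
      nlinarith

theorem innerB_mem (x : Int) (hx : 1 ≤ x) (d : Int) (hd : 1 ≤ d) (s : List Int) (a : Int) :
    a ∈ es2InnerB x d s ↔ Xor' (a ∈ s) (PDiv x a ∧ d ≤ a ∧ d * a ≤ x) :=
  innerBGo_mem x hx (x + 1 - d).toNat d hd (le_refl _) s a

-- the two outer loops keep membership-equal sets and identical result lists
theorem fold_eq : ∀ (xs : List Int), (∀ x ∈ xs, 1 ≤ x) →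
    ∀ (ris : List Int) (sA sB : PySem.Set Int), (∀ a, a ∈ sA ↔ a ∈ sB) →
    (xs.foldl es2BodyA (ris, sA)).1 = (xs.foldl es2BodyB (ris, sB)).1 := by
  intro xs
  induction xs with
  | nil => intro _ ris sA sB _; rfl
  | cons x t ih =>
    intro hx ris sA sB h
    have hx1 : 1 ≤ x := hx x (by simp)
    rw [List.foldl_cons, List.foldl_cons]
    by_cases hm : x ∈ sA
    · have hbA : es2BodyA (ris, sA) x = (ris, sA) := by
        unfold es2BodyA; rw [if_pos ((PySem.Set.contains_iff _ _).mpr hm)]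
      have hbB : es2BodyB (ris, sB) x = (ris, sB) := by
        unfold es2BodyB; rw [if_pos ((PySem.Set.contains_iff _ _).mpr ((h x).mp hm))]
      rw [hbA, hbB]
      exact ih (fun y hy => hx y (by simp [hy])) ris sA sB h
    · have hbA : es2BodyA (ris, sA) x = (ris ++ [x],
          (PySem.List.pyRange 1 (PySem.Int.floordiv x 2 + 1) 1).foldl
            (fun s i => if PySem.Int.mod x i = 0 then es2StepA x s i else s) sA) := by
        unfold es2BodyA
        rw [if_neg (fun hc => hm ((PySem.Set.contains_iff _ _).mp hc))]
      have hbB : es2BodyB (ris, sB) x = (ris ++ [x], es2InnerB x 1 sB) := by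
        unfold es2BodyB
        rw [if_neg (fun hc => hm ((h x).mpr ((PySem.Set.contains_iff _ _).mp hc)))]
      rw [hbA, hbB]
      apply ih (fun y hy => hx y (by simp [hy]))
      intro a
      have h0 : (0 : Int) ≤ PySem.Int.floordiv x 2 :=
        (PySem.Int.le_floordiv_iff_mul_le (by norm_num)).mpr (by omega)
      have hn : ((PySem.Int.floordiv x 2).toNat : Int) = PySem.Int.floordiv x 2 :=
        Int.toNat_of_nonneg h0
      have e1 : a ∈ (PySem.List.pyRange 1 (PySem.Int.floordiv x 2 + 1) 1).foldl
            (fun s i => if PySem.Int.mod x i = 0 then es2StepA x s i else s) sA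
          ↔ Xor' (a ∈ sA) (PDiv x a) := by
        rw [← hn, innerA_mem x (PySem.Int.floordiv x 2).toNat sA a]
        exact xor_congr_right _ _ _ (by rw [hn]; exact condA_iff x a hx1)
      have e2 : a ∈ es2InnerB x 1 sB ↔ Xor' (a ∈ sB) (PDiv x a) := by
        rw [innerB_mem x hx1 1 (by norm_num) sB a]
        refine xor_congr_right _ _ _ ?_
        constructor
        · rintro ⟨hP, _, _⟩; exact hP
        · intro hP; exact ⟨hP, hP.1, by rw [one_mul]; exact le_of_lt hP.2.1⟩
      rw [e1, e2]
      unfold Xor'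
      have := h a
      tauto

-- the first component of A's fold is the initial list extended by a sublist of the traversed xs
theorem foldA_sublist : ∀ (xs ris : List Int) (s : PySem.Set Int),
    ∃ t, (xs.foldl es2BodyA (ris, s)).1 = ris ++ t ∧ t.Sublist xs := by
  intro xs
  induction xs with
  | nil => intro ris s; exact ⟨[], by simp, List.nil_sublist _⟩
  | cons x xs ih =>
    intro ris s
    rw [List.foldl_cons]
    by_cases hc : PySem.Set.contains s x = true
    · have hb : es2BodyA (ris, s) x = (ris, s) := by unfold es2BodyA; rw [if_pos hc]
      rw [hb]
      obtain ⟨t, h1, h2⟩ := ih ris s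
      exact ⟨t, h1, h2.cons x⟩
    · have hb : es2BodyA (ris, s) x = (ris ++ [x],
          (PySem.List.pyRange 1 (PySem.Int.floordiv x 2 + 1) 1).foldl
            (fun s i => if PySem.Int.mod x i = 0 then es2StepA x s i else s) s) := by
        unfold es2BodyA; rw [if_neg hc]
      rw [hb]
      obtain ⟨t, h1, h2⟩ := ih (ris ++ [x])
        ((PySem.List.pyRange 1 (PySem.Int.floordiv x 2 + 1) 1).foldl
          (fun s i => if PySem.Int.mod x i = 0 then es2StepA x s i else s) s)
      exact ⟨x :: t, by rw [h1]; simp, h2.cons₂ x⟩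

-- ===== VERDICT (by name: the statement is the Claim_ definition above) =====
theorem es2_spec : Claim_equal_es2 := by
  intro N ins _
  unfold Spec_es2 es2 es2_alt
  simp only []
  have hmem : ∀ x ∈ (PySem.List.pyRange 1 (N+1) 1).reverse, (1:Int) ≤ x := by
    intro x hxm
    rw [List.mem_reverse] at hxm
    exact (PySem.List.mem_pyRange_one.mp hxm).1
  have heq := fold_eq _ hmem [] (PySem.Set.ofList ins) (PySem.Set.ofList ins) (fun a => Iff.rfl)
  obtain ⟨t, ht1, ht2⟩ := foldA_sublist ((PySem.List.pyRange 1 (N+1) 1).reverse) [] (PySem.Set.ofList ins)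
  rw [List.nil_append] at ht1
  have hpw : ((PySem.List.pyRange 1 (N+1) 1).reverse).Pairwise (fun a b => b < a) := by
    rw [List.pairwise_reverse]
    exact PySem.List.pairwise_lt_pyRange_one 1 (N+1)
  have hpt : t.Pairwise (fun a b => b < a) := hpw.sublist ht2
  rw [← heq, ht1]
  exact PySem.List.sorted_eq_of_perm_of_pairwise_lt t t.reverse (fun y => y)
    t.reverse_perm (by rw [List.pairwise_reverse]; exact hpt)
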